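-- pv_equiv track=rewrite | github.com/DhyeyMavani2003/amherst-college-materials | SPRING 2022/cryptography/pset5/5-ppFactor/ppFactorSoln.py | ppFactor
-- ===== SOURCE A (Python) =====
-- def ppFactor(p):
--
--     d, primeFactors = 2, []
--     while d*d <= p:
--         j = 0
--         while (p % d) == 0:
--             p //= d
--             j += 1
--         if j>0:
--             primeFactors.append(d**j)
--         d += 1
--     if p > 1:
--         primeFactors.append(p)
--     return primeFactors
-- ===== SOURCE B (Python) =====
-- def ppFactor(p):
--     flat = []
--     d = 2
--     while d * d <= p:
--         while p % d == 0:
--             flat.append(d)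
--             p //= d
--         d += 1
--     if p > 1:
--         flat.append(p)
--     return _powGroups(flat)
--
-- def _powGroups(flat):
--     if not flat:
--         return []
--     f = flat[0]
--     n = 1
--     while n < len(flat) and flat[n] == f:
--         n += 1
--     return [f ** n] + _powGroups(flat[n:])
-- ===== Notes on version B (the rewrite author's own statement) =====
-- stated objective: alternative
-- what changed: B collects each divisor into a flat multiset-style list (one append per successful division, leftover prime appended once) and then builds the prime powers in a separate run-length grouping pass, instead of counting an exponent inside the trial-division loop.
import Mathlib
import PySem

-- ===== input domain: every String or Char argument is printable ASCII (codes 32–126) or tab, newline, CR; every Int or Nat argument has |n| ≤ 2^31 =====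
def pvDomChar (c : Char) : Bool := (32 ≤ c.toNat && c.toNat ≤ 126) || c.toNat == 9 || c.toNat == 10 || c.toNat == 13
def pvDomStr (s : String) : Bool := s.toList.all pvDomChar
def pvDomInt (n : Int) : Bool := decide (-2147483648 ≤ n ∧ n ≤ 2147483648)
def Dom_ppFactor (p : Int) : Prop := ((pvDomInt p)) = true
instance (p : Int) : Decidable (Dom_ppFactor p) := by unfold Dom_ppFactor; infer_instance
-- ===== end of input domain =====

-- B replaces A's in-loop exponent counter by a flat list of divisors (one entry per
-- division) followed by a separate run-length grouping pass; same cost, alternative shape.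

-- ===== PORT A =====
-- termination measures, proved once so the recursive definitions stay small
lemma pvDecInner (d p : Int) (h : 0 < p ∧ 1 < d ∧ PySem.Int.mod p d = 0) :
    (PySem.Int.floordiv p d).toNat < p.toNat := by
  rw [PySem.Int.floordiv_eq_ediv_of_pos (by omega)]
  have h1 : p / d < p := by
    rw [Int.ediv_lt_iff_lt_mul (by omega)]
    calc p = p * 1 := (p.mul_one).symm
    _ < p * d := mul_lt_mul_of_pos_left h.2.1 h.1
  have h2 : 0 ≤ p / d := Int.ediv_nonneg (le_of_lt h.1) (by omega)
  omega


-- inner `while p % d == 0: p //= d; j += 1`; the `0 < p ∧ 1 < d` conjuncts only make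
-- the recursion total (they always hold when Python enters this loop, since d*d ≤ p, d ≥ 2)
def ppFactorInner (d p : Int) (j : Nat) : Int × Nat :=
  if h : 0 < p ∧ 1 < d ∧ PySem.Int.mod p d = 0 then
    ppFactorInner d (PySem.Int.floordiv p d) (j + 1)
  else (p, j)
termination_by p.toNat
decreasing_by exact pvDecInner d p h

-- the final p after dividing never exceeds the starting p (needed for outer termination)
lemma ppFactorInner_fst_le (d p : Int) (j : Nat) : (ppFactorInner d p j).1 ≤ p := by
  induction p, j using ppFactorInner.induct d with
  | case1 p j h ih =>
    rw [ppFactorInner, dif_pos h]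
    refine le_trans ih ?_
    rw [PySem.Int.floordiv_eq_ediv_of_pos (by omega)]
    exact Int.ediv_le_self d (le_of_lt h.1)
  | case2 p j h => rw [ppFactorInner, dif_neg h]

lemma pvDecOuter (d p : Int) {q : Int} (hq : q ≤ p) (h : 2 ≤ d ∧ d * d ≤ p) :
    (q - (d + 1)).toNat < (p - d).toNat := by
  have h2 : 2 * d ≤ d * d := mul_le_mul_of_nonneg_right h.1 (by omega)
  omega

-- outer `while d*d <= p` loop of A; the `2 ≤ d` conjunct only makes the recursion total
-- (d starts at 2 and only grows)
def ppFactorOuter (d p : Int) (acc : List Int) : Int × List Int :=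
  if h : 2 ≤ d ∧ d * d ≤ p then
    let r := ppFactorInner d p 0
    ppFactorOuter (d + 1) r.1 (if 0 < r.2 then acc ++ [d ^ r.2] else acc)
  else (p, acc)
termination_by (p - d).toNat
decreasing_by exact pvDecOuter d p (ppFactorInner_fst_le d p 0) h

def ppFactor (p : Int) : List Int :=
  let r := ppFactorOuter 2 p []
  if 1 < r.1 then r.2 ++ [r.1] else r.2

-- ===== PORT B =====
-- inner loop of B: appends d to the flat list once per division (same totality conjuncts)
def ppFactorAltInner (d p : Int) (flat : List Int) : Int × List Int :=
  if h : 0 < p ∧ 1 < d ∧ PySem.Int.mod p d = 0 then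
    ppFactorAltInner d (PySem.Int.floordiv p d) (flat ++ [d])
  else (p, flat)
termination_by p.toNat
decreasing_by exact pvDecInner d p h

lemma ppFactorAltInner_fst_le (d p : Int) (flat : List Int) :
    (ppFactorAltInner d p flat).1 ≤ p := by
  induction p, flat using ppFactorAltInner.induct d with
  | case1 p flat h ih =>
    rw [ppFactorAltInner, dif_pos h]
    refine le_trans ih ?_
    rw [PySem.Int.floordiv_eq_ediv_of_pos (by omega)]
    exact Int.ediv_le_self d (le_of_lt h.1)
  | case2 p flat h => rw [ppFactorAltInner, dif_neg h]

def ppFactorAltOuter (d p : Int) (flat : List Int) : Int × List Int :=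
  if h : 2 ≤ d ∧ d * d ≤ p then
    let r := ppFactorAltInner d p flat
    ppFactorAltOuter (d + 1) r.1 r.2
  else (p, flat)
termination_by (p - d).toNat
decreasing_by exact pvDecOuter d p (ppFactorAltInner_fst_le d p flat) h

lemma pvDecGroup (f : Int) (rest : List Int) :
    (rest.span (· == f)).2.length < (f :: rest).length := by
  simp only [List.span_eq_takeWhile_dropWhile]
  have := List.length_dropWhile_le (· == f) rest
  simp; omega

-- `_powGroups`: the run-length grouping pass (the index-scanning while is `span`)
def powGroups (flat : List Int) : List Int :=
  match flat with
  | [] => []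
  | f :: rest =>
    let s := rest.span (· == f)
    f ^ (s.1.length + 1) :: powGroups s.2
termination_by flat.length
decreasing_by exact pvDecGroup f rest

def ppFactor_alt (p : Int) : List Int :=
  let r := ppFactorAltOuter 2 p []
  powGroups (if 1 < r.1 then r.2 ++ [r.1] else r.2)

-- ===== PRECONDITION & SPEC =====
def Spec_ppFactor (p : Int) (out : List Int) : Prop := out = ppFactor_alt p
instance (p : Int) (out : List Int) : Decidable (Spec_ppFactor p out) := by unfold Spec_ppFactor; infer_instance

-- ===== CLAIM (what is proved, stated in full; the proofs are below) =====
def Claim_equal_ppFactor : Prop := ∀ (p : Int), Dom_ppFactor p → Spec_ppFactor p (ppFactor p)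

-- ===== LEMMAS AND PROOFS =====

-- proof-side: non-accumulating version of the inner loop
def multExp (d p : Int) : Int × Nat :=
  if h : 0 < p ∧ 1 < d ∧ PySem.Int.mod p d = 0 then
    let r := multExp d (PySem.Int.floordiv p d)
    (r.1, r.2 + 1)
  else (p, 0)
termination_by p.toNat
decreasing_by exact pvDecInner d p h

lemma ppFactorInner_eq_multExp (d p : Int) (j : Nat) :
    ppFactorInner d p j = ((multExp d p).1, j + (multExp d p).2) := by
  induction p, j using ppFactorInner.induct d with
  | case1 p j h ih =>
    rw [ppFactorInner, dif_pos h, ih]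
    conv_rhs => rw [multExp, dif_pos h]
    show ((multExp d (PySem.Int.floordiv p d)).1,
        (j + 1) + (multExp d (PySem.Int.floordiv p d)).2)
      = ((multExp d (PySem.Int.floordiv p d)).1,
        j + ((multExp d (PySem.Int.floordiv p d)).2 + 1))
    rw [Prod.mk.injEq]
    exact ⟨rfl, by omega⟩
  | case2 p j h =>
    rw [ppFactorInner, dif_neg h, multExp, dif_neg h]
    simp

lemma ppFactorAltInner_eq_multExp (d p : Int) (flat : List Int) :
    ppFactorAltInner d p flat = ((multExp d p).1, flat ++ List.replicate (multExp d p).2 d) := by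
  induction p, flat using ppFactorAltInner.induct d with
  | case1 p flat h ih =>
    rw [ppFactorAltInner, dif_pos h, ih]
    conv_rhs => rw [multExp, dif_pos h]
    show ((multExp d (PySem.Int.floordiv p d)).1,
        (flat ++ [d]) ++ List.replicate (multExp d (PySem.Int.floordiv p d)).2 d)
      = ((multExp d (PySem.Int.floordiv p d)).1,
        flat ++ List.replicate ((multExp d (PySem.Int.floordiv p d)).2 + 1) d)
    rw [Prod.mk.injEq]
    refine ⟨rfl, ?_⟩
    rw [List.append_assoc, List.singleton_append, ← List.replicate_succ]
  | case2 p flat h =>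
    rw [ppFactorAltInner, dif_neg h, multExp, dif_neg h]
    simp

lemma multExp_spec (d : Int) (hd : 1 < d) : ∀ p : Int, 0 < p →
    (multExp d p).1 * d ^ (multExp d p).2 = p ∧ ¬ d ∣ (multExp d p).1 ∧ 0 < (multExp d p).1 := by
  intro p
  induction p using multExp.induct d with
  | case1 p h ih =>
    intro hp
    have hdvd : d ∣ p := (PySem.Int.mod_eq_zero_iff_dvd p d).1 h.2.2
    have hfd : PySem.Int.floordiv p d = p / d := PySem.Int.floordiv_eq_ediv_of_pos (by omega)
    have hq : 0 < p / d := by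
      rcases le_or_gt (p / d) 0 with hle | hgt
      · exfalso
        have hx : p / d * d ≤ 0 := by nlinarith
        rw [Int.ediv_mul_cancel hdvd] at hx
        omega
      · exact hgt
    have ih' := ih (by rwa [hfd])
    rw [multExp, dif_pos h]
    show (multExp d (PySem.Int.floordiv p d)).1 * d ^ ((multExp d (PySem.Int.floordiv p d)).2 + 1) = p
      ∧ ¬ d ∣ (multExp d (PySem.Int.floordiv p d)).1 ∧ 0 < (multExp d (PySem.Int.floordiv p d)).1
    simp only [hfd] at ih' ⊢
    refine ⟨?_, ih'.2.1, ih'.2.2⟩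
    calc (multExp d (p/d)).1 * d ^ ((multExp d (p/d)).2 + 1)
        = ((multExp d (p/d)).1 * d ^ (multExp d (p/d)).2) * d := by ring
      _ = (p / d) * d := by rw [ih'.1]
      _ = p := Int.ediv_mul_cancel hdvd
  | case2 p h =>
    intro hp
    rw [multExp, dif_neg h]
    have hmod : PySem.Int.mod p d ≠ 0 := by
      intro hc; exact h ⟨hp, hd, hc⟩
    refine ⟨by simp, ?_, hp⟩
    intro hdv
    exact hmod ((PySem.Int.mod_eq_zero_iff_dvd p d).2 hdv)

-- one outer step of A, phrased through multExp
lemma outerA_step (d p : Int) (acc : List Int) (hg : 2 ≤ d ∧ d * d ≤ p) :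
    ppFactorOuter d p acc = ppFactorOuter (d + 1) (multExp d p).1
      (if 0 < (multExp d p).2 then acc ++ [d ^ (multExp d p).2] else acc) := by
  rw [ppFactorOuter, dif_pos hg]
  show ppFactorOuter (d + 1) (ppFactorInner d p 0).1
      (if 0 < (ppFactorInner d p 0).2 then acc ++ [d ^ (ppFactorInner d p 0).2] else acc) = _
  rw [ppFactorInner_eq_multExp]
  simp

-- one outer step of B, phrased through multExp
lemma outerB_step (d p : Int) (flat : List Int) (hg : 2 ≤ d ∧ d * d ≤ p) :
    ppFactorAltOuter d p flat = ppFactorAltOuter (d + 1) (multExp d p).1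
      (flat ++ List.replicate (multExp d p).2 d) := by
  rw [ppFactorAltOuter, dif_pos hg]
  show ppFactorAltOuter (d + 1) (ppFactorAltInner d p flat).1 (ppFactorAltInner d p flat).2 = _
  rw [ppFactorAltInner_eq_multExp]

lemma span_replicate (k : Nat) (d : Int) (tail : List Int) (ht : ∀ x ∈ tail, x ≠ d) :
    (List.replicate k d ++ tail).span (· == d) = (List.replicate k d, tail) := by
  induction k with
  | zero =>
    cases tail with
    | nil => rfl
    | cons t ts =>
      have : (t == d) = false := by
        simp only [beq_eq_false_iff_ne]; exact ht t (by simp)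
      simp [List.span, List.span.loop, this]
  | succ k ih =>
    simp only [List.replicate_succ, List.cons_append]
    simp only [List.span_eq_takeWhile_dropWhile] at ih ⊢
    simp [List.takeWhile, List.dropWhile, Prod.ext_iff] at ih ⊢
    exact ih

lemma powGroups_nil : powGroups [] = [] := by
  rw [powGroups]

lemma powGroups_replicate (j : Nat) (d : Int) (tail : List Int) (ht : ∀ x ∈ tail, x ≠ d) :
    powGroups (List.replicate j d ++ tail) =
      (if 0 < j then [d ^ j] else []) ++ powGroups tail := by
  cases j with
  | zero => simp
  | succ k =>
    rw [List.replicate_succ, List.cons_append, powGroups]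
    have hs := span_replicate k d tail ht
    simp only [hs, List.length_replicate]
    simp

lemma powGroups_singleton (q : Int) : powGroups [q] = [q] := by
  rw [powGroups]
  simp [List.span, List.span.loop, powGroups_nil]

-- the loop correspondence at exit (guard false)
lemma outer_base (d p : Int) (acc flat : List Int) (hg : ¬ (2 ≤ d ∧ d * d ≤ p))
    (hd : 2 ≤ d)
    (hdvd : ∀ e : Int, 2 ≤ e → e < d → ¬ e ∣ p)
    (hgrp : ∀ tail : List Int, (∀ x ∈ tail, d ≤ x) →
        powGroups (flat ++ tail) = acc ++ powGroups tail) :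
    powGroups (if 1 < (ppFactorAltOuter d p flat).1
        then (ppFactorAltOuter d p flat).2 ++ [(ppFactorAltOuter d p flat).1]
        else (ppFactorAltOuter d p flat).2)
      = (if 1 < (ppFactorOuter d p acc).1
        then (ppFactorOuter d p acc).2 ++ [(ppFactorOuter d p acc).1]
        else (ppFactorOuter d p acc).2) := by
  rw [ppFactorOuter, dif_neg hg, ppFactorAltOuter, dif_neg hg]
  by_cases hp : 1 < p
  · have hdp : d ≤ p := by
      rcases le_or_gt d p with hle | hgt
      · exact hle
      · exact absurd dvd_rfl (hdvd p (by omega) (by omega))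
    simp only [if_pos hp]
    rw [hgrp [p] (by intro x hx; simp at hx; omega), powGroups_singleton]
  · simp only [if_neg hp]
    have := hgrp [] (by intro x hx; simp at hx)
    simpa [powGroups_nil] using this

-- the main loop correspondence, by induction on the fuel bound (p - d).toNat
lemma outer_main : ∀ (n : Nat) (d p : Int) (acc flat : List Int), (p - d).toNat ≤ n →
    2 ≤ d →
    (∀ e : Int, 2 ≤ e → e < d → ¬ e ∣ p) →
    (∀ tail : List Int, (∀ x ∈ tail, d ≤ x) →
        powGroups (flat ++ tail) = acc ++ powGroups tail) →
    powGroups (if 1 < (ppFactorAltOuter d p flat).1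
        then (ppFactorAltOuter d p flat).2 ++ [(ppFactorAltOuter d p flat).1]
        else (ppFactorAltOuter d p flat).2)
      = (if 1 < (ppFactorOuter d p acc).1
        then (ppFactorOuter d p acc).2 ++ [(ppFactorOuter d p acc).1]
        else (ppFactorOuter d p acc).2) := by
  intro n
  induction n with
  | zero =>
    intro d p acc flat hm hd hdvd hgrp
    have hg : ¬ (2 ≤ d ∧ d * d ≤ p) := by
      intro hg
      have : 2 * d ≤ d * d := by nlinarith [hg.1]
      omega
    exact outer_base d p acc flat hg hd hdvd hgrp
  | succ n ihn =>
    intro d p acc flat hm hd hdvd hgrp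
    by_cases hg : 2 ≤ d ∧ d * d ≤ p
    · have hp0 : 0 < p := by nlinarith [hg.1, hg.2]
      have hd1 : (1:Int) < d := by omega
      obtain ⟨hmul, hnd, hpos⟩ := multExp_spec d hd1 p hp0
      have hpow1 : (1:Int) ≤ d ^ (multExp d p).2 := one_le_pow₀ (by omega)
      have hple : (multExp d p).1 ≤ p := by nlinarith
      rw [outerA_step d p acc hg, outerB_step d p flat hg]
      apply ihn
      · have : 2 * d ≤ d * d := by nlinarith [hg.1]
        omega
      · omega
      · intro e he2 heu hedvd
        have hr1dvd : (multExp d p).1 ∣ p := ⟨d ^ (multExp d p).2, hmul.symm⟩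
        by_cases hce : e = d
        · subst hce; exact hnd hedvd
        · exact hdvd e he2 (by omega) (dvd_trans hedvd hr1dvd)
      · intro tail htail
        have h1 : powGroups (flat ++ List.replicate (multExp d p).2 d ++ tail)
            = acc ++ powGroups (List.replicate (multExp d p).2 d ++ tail) := by
          rw [List.append_assoc]
          apply hgrp
          intro x hx
          rcases List.mem_append.1 hx with hx | hx
          · rw [List.eq_of_mem_replicate hx]
          · exact le_trans (by omega) (htail x hx)
        have h2 : powGroups (List.replicate (multExp d p).2 d ++ tail)
            = (if 0 < (multExp d p).2 then [d ^ (multExp d p).2] else []) ++ powGroups tail := by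
          apply powGroups_replicate
          intro x hx
          have := htail x hx; omega
        rw [h1, h2]
        by_cases hj : 0 < (multExp d p).2 <;> simp [hj]
    · exact outer_base d p acc flat hg hd hdvd hgrp

-- ===== VERDICT (by name: the statement is the Claim_ definition above) =====
theorem ppFactor_spec : Claim_equal_ppFactor := by
  intro p _
  unfold Spec_ppFactor ppFactor ppFactor_alt
  have h := outer_main (p - 2).toNat 2 p [] [] (le_refl _) (by omega)
    (by intro e he1 he2 _; omega)
    (by intro tail _; rw [List.nil_append, List.nil_append])
  simp only at h ⊢
  exact h.symm
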